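-- pv_equiv track=rewrite | github.com/bedapub/bksnake | workflow/scripts/funcs.py | translate_species
-- ===== SOURCE A (Python) =====
-- def translate_species(input_value, translation_dict, ignore_case=True):
--     """Translate input species value to standardized output value, with optional case sensitivity.
--
--     Parameters
--     ----------
--     input_value : str
--         The input species value to translate.
--     translation_dict : dict
--         The translation dictionary loaded from the YAML file.
--     ignore_case : bool, optional
--         Whether to ignore case when matching (default is True).
--
--     Returns
--     -------
--     str
--         The standardized output value if found, otherwise the original input value.
--     """
--     if ignore_case:
--         input_value_lower = input_value.lower()
--         for standard_value, synonyms in translation_dict.items():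
--             if input_value_lower in (synonym.lower() for synonym in synonyms):
--                 return standard_value
--     else:
--         for standard_value, synonyms in translation_dict.items():
--             if input_value in synonyms:
--                 return standard_value
--     return input_value
-- ===== SOURCE B (Python) =====
-- def translate_species(input_value, translation_dict, ignore_case=True):
--     table = {}
--     for standard_value, synonyms in translation_dict.items():
--         for synonym in synonyms:
--             key = synonym.lower() if ignore_case else synonym
--             if key not in table:
--                 table[key] = standard_value
--     lookup_key = input_value.lower() if ignore_case else input_value
--     return table.get(lookup_key, input_value)
-- ===== Notes on version B (the rewrite author's own statement) =====
-- stated objective: alternative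
-- what changed: Replaces A's per-entry linear scan over every synonym list with a flat first-wins lookup table built once, followed by a single dict lookup.
import Mathlib
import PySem

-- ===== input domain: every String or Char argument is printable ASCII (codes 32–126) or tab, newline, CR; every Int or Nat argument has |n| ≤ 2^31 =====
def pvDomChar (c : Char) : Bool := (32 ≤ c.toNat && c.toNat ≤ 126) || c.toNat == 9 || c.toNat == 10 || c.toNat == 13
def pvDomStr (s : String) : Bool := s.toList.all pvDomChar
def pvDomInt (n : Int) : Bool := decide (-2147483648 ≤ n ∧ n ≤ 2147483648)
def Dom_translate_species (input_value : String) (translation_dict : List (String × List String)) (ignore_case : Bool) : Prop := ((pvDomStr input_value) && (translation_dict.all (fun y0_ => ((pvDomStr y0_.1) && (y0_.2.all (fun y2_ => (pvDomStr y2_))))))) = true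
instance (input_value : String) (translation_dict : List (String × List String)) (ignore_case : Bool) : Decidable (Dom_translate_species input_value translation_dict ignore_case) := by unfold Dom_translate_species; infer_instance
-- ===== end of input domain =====

-- B replaces A's per-entry linear scan with a first-wins lookup table built once, then one dict lookup (same cost, different structure).

-- ===== PORT A =====
-- the for-loop with early return is the first entry whose synonyms contain the (possibly lowered) input
def translate_species (input_value : String) (translation_dict : List (String × List String)) (ignore_case : Bool) : String :=
  if ignore_case then
    let input_value_lower := PySem.Str.lower input_value
    match translation_dict.find? (fun p => p.2.any (fun synonym => PySem.Str.lower synonym == input_value_lower)) with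
    | some p => p.1
    | none => input_value
  else
    match translation_dict.find? (fun p => p.2.any (fun synonym => synonym == input_value)) with
    | some p => p.1
    | none => input_value

-- ===== PORT B =====
def tsKey (ignore_case : Bool) (s : String) : String :=
  if ignore_case then PySem.Str.lower s else s

-- the two nested build loops of Source B: insert key -> standard_value only if the key is absent
def tsBuild (translation_dict : List (String × List String)) (ignore_case : Bool) : PySem.Dict String String :=
  translation_dict.foldl
    (fun table p =>
      p.2.foldl
        (fun table synonym =>
          if table.contains (tsKey ignore_case synonym) then table
          else table.insert (tsKey ignore_case synonym) p.1)
        table)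
    PySem.Dict.empty

def translate_species_alt (input_value : String) (translation_dict : List (String × List String)) (ignore_case : Bool) : String :=
  (tsBuild translation_dict ignore_case).getD (tsKey ignore_case input_value) input_value

-- ===== PRECONDITION & SPEC =====
def Spec_translate_species (input_value : String) (translation_dict : List (String × List String)) (ignore_case : Bool) (out : String) : Prop := out = translate_species_alt input_value translation_dict ignore_case
instance (input_value : String) (translation_dict : List (String × List String)) (ignore_case : Bool) (out : String) : Decidable (Spec_translate_species input_value translation_dict ignore_case out) := by unfold Spec_translate_species; infer_instance

-- ===== CLAIM (what is proved, stated in full; the proofs are below) =====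
def Claim_equal_translate_species : Prop := ∀ (input_value : String) (translation_dict : List (String × List String)) (ignore_case : Bool), Dom_translate_species input_value translation_dict ignore_case → Spec_translate_species input_value translation_dict ignore_case (translate_species input_value translation_dict ignore_case)

-- ===== LEMMAS AND PROOFS =====

-- inner build loop: lookup after inserting a row's synonyms (first-wins)
theorem tsBuild_inner (ic : Bool) (std : String) (syns : List String)
    (d : PySem.Dict String String) (k : String) :
    (syns.foldl
      (fun table synonym =>
        if table.contains (tsKey ic synonym) then table
        else table.insert (tsKey ic synonym) std) d).get? k
    = (d.get? k).or (if syns.any (fun s => tsKey ic s == k) then some std else none) := by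
  induction syns generalizing d with
  | nil => simp
  | cons s rest ih =>
    simp only [List.foldl_cons, List.any_cons, ih]
    rcases Bool.eq_false_or_eq_true (d.contains (tsKey ic s)) with hc | hc
    · cases hv : d.get? (tsKey ic s) with
      | none =>
        rw [PySem.Dict.contains_eq_isSome_get?, hv] at hc
        simp at hc
      | some v =>
        by_cases hk : tsKey ic s = k
        · subst hk
          simp [hc, hv]
        · simp [hc, hk]
    · have hn : d.get? (tsKey ic s) = none := by
        rw [← Option.not_isSome_iff_eq_none, ← PySem.Dict.contains_eq_isSome_get?]
        simp [hc]
      by_cases hk : tsKey ic s = k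
      · subst hk
        simp [hc, hn, PySem.Dict.get?_insert_self]
      · simp [hc, hk, PySem.Dict.get?_insert_of_ne d std (Ne.symm hk)]

-- outer build loop: lookup in the finished table is the first matching entry's standard value
theorem tsBuild_get? (ic : Bool) (td : List (String × List String))
    (d : PySem.Dict String String) (k : String) :
    (td.foldl
      (fun table p =>
        p.2.foldl
          (fun table synonym =>
            if table.contains (tsKey ic synonym) then table
            else table.insert (tsKey ic synonym) p.1) table) d).get? k
    = (d.get? k).or ((td.find? (fun p => p.2.any (fun s => tsKey ic s == k))).map (·.1)) := by
  induction td generalizing d with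
  | nil => simp
  | cons p rest ih =>
    simp only [List.foldl_cons, ih, tsBuild_inner]
    by_cases h : p.2.any (fun s => tsKey ic s == k)
    · simp [List.find?_cons_of_pos, h]
    · simp only [h]
      rw [List.find?_cons_of_neg (by simp [h])]
      simp

theorem translate_species_eq_alt (input_value : String)
    (translation_dict : List (String × List String)) (ignore_case : Bool) :
    translate_species input_value translation_dict ignore_case
    = translate_species_alt input_value translation_dict ignore_case := by
  unfold translate_species translate_species_alt tsBuild
  rw [PySem.Dict.getD_eq_get?_getD, tsBuild_get?]
  cases ignore_case with
  | false =>
    simp only [if_false, Bool.false_eq_true, tsKey]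
    cases translation_dict.find? (fun p => p.2.any (fun synonym => synonym == input_value)) <;>
      simp
  | true =>
    simp only [if_true, tsKey]
    cases translation_dict.find?
        (fun p => p.2.any (fun synonym => PySem.Str.lower synonym == PySem.Str.lower input_value)) <;>
      simp

-- ===== VERDICT (by name: the statement is the Claim_ definition above) =====
theorem translate_species_spec : Claim_equal_translate_species := by
  intro input_value translation_dict ignore_case _
  exact translate_species_eq_alt input_value translation_dict ignore_case
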